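-- pv_equiv track=rewrite | github.com/wong-justin/formatting | formatting.py | class_doc
-- ===== SOURCE A (Python) =====
-- INDENT_SIZE = 4
--
-- INDENT = ' ' * INDENT_SIZE
--
-- def class_doc(line):
--     '''Docstring for a class. Short.
--
--     Params:
--         line - line containing class header/definition.
--     '''
--
--     s = """'''#TODO'''
-- """
--     num_indents = indent_depth(line) + 1
--     docstring = ''
--     for result_line in s.split('\n'):
--         docstring += INDENT * num_indents + result_line + '\n'
--     return docstring
--
-- def indent_depth(line):
--     '''Returns number of indents that a line starts with.
--     INDENT_SIZE and corresdonding INDENT of spaces initialized at start of program.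
--
--     Params:
--         line - any line
--     '''
--
--     depth = 0
--
--     while line[:INDENT_SIZE] == INDENT:
--         line = line[INDENT_SIZE:]
--         depth += 1
--     return depth
-- ===== SOURCE B (Python) =====
-- INDENT_SIZE = 4
--
-- INDENT = ' ' * INDENT_SIZE
--
-- def class_doc(line):
--     '''Docstring for a class. Short.
--
--     Params:
--         line - line containing class header/definition.
--     '''
--     depth = (len(line) - len(line.lstrip(' '))) // INDENT_SIZE
--     prefix = INDENT * (depth + 1)
--     return prefix + "'''#TODO'''\n" + prefix + "\n"
-- ===== Notes on version B (the rewrite author's own statement) =====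
-- stated objective: simpler
-- what changed: indent_depth's repeated 4-char block-stripping loop is replaced by closed-form division on a single measurement of the leading spaces, and the loop appending the split lines one by one is replaced by a direct concatenation of the two output lines.
import Mathlib
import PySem

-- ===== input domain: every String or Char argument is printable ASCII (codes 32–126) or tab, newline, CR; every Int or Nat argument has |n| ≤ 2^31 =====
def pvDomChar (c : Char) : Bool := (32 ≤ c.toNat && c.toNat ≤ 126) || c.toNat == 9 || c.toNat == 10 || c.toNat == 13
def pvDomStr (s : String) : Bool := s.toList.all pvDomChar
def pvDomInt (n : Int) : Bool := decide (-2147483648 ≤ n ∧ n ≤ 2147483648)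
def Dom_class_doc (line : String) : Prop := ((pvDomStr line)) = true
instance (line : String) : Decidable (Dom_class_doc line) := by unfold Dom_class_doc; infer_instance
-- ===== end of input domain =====

-- B replaces the repeated 4-char block-stripping loop by closed-form arithmetic on one
-- lstrip(' ') measurement and the line-appending loop by a direct concatenation (objective: simpler).

-- ===== PORT A =====
-- indent_depth: while line[:4] == INDENT: line = line[4:]; depth += 1
-- (the slice test 'line[:4] == "    "' holds exactly when the first four chars exist and are spaces,
--  which is the pattern below; exact transliteration of the loop as structural recursion)
def pvIndentDepthA : List Char → Nat
  | ' ' :: ' ' :: ' ' :: ' ' :: rest => pvIndentDepthA rest + 1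
  | _ => 0

-- class_doc body on the code points: docstring = ''; for result_line in s.split('\n'): docstring += INDENT*num + result_line + '\n'
def pvClassDocA (cs : List Char) : List Char :=
  let s := "'''#TODO'''\n".toList
  let numIndents : Nat := pvIndentDepthA cs + 1
  (PySem.Chars.splitOn s "\n".toList).foldl
    (fun doc rl => doc ++ PySem.List.pyRepeat "    ".toList (numIndents : Int) ++ rl ++ "\n".toList) []

def class_doc (line : String) : String := String.ofList (pvClassDocA line.toList)

-- ===== PORT B =====
def pvClassDocB (cs : List Char) : List Char :=
  -- line.lstrip(' ') ported by hand as dropWhile (· == ' '): exact, only ' ' is stripped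
  let stripped := cs.dropWhile (· == ' ')
  let depth : Nat := (cs.length - stripped.length) / 4
  let pre := PySem.List.pyRepeat "    ".toList ((depth + 1 : Nat) : Int)
  pre ++ "'''#TODO'''\n".toList ++ pre ++ "\n".toList

def class_doc_alt (line : String) : String := String.ofList (pvClassDocB line.toList)

-- ===== PRECONDITION & SPEC =====
def Spec_class_doc (line : String) (out : String) : Prop := out = class_doc_alt line
instance (line : String) (out : String) : Decidable (Spec_class_doc line out) := by unfold Spec_class_doc; infer_instance

-- ===== CLAIM (what is proved, stated in full; the proofs are below) =====
def Claim_equal_class_doc : Prop := ∀ (line : String), Dom_class_doc line → Spec_class_doc line (class_doc line)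

-- ===== LEMMAS AND PROOFS =====

-- A's block-stripping loop computes leading-space-count / 4.
theorem pvIndentDepthA_eq (cs : List Char) :
    pvIndentDepthA cs = (cs.length - (cs.dropWhile (· == ' ')).length) / 4 := by
  induction cs using pvIndentDepthA.induct with
  | case1 rest ih =>
      have h := List.length_dropWhile_le (p := (· == ' ')) (l := rest)
      simp [pvIndentDepthA, List.dropWhile, ih]
      omega
  | case2 l h =>
      match l, h with
      | [], _ => simp [pvIndentDepthA]
      | [a], _ =>
          simp only [pvIndentDepthA, List.dropWhile, List.length]
          split <;> simp
      | [a, b], _ =>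
          simp only [pvIndentDepthA, List.dropWhile, List.length]
          split <;> [skip; simp] <;> split <;> simp
      | [a, b, c], _ =>
          simp only [pvIndentDepthA, List.dropWhile, List.length]
          split <;> [skip; simp] <;> split <;> [skip; simp] <;> split <;> simp
      | a :: b :: c :: d :: rest, h =>
          have hne : ¬ (a = ' ' ∧ b = ' ' ∧ c = ' ' ∧ d = ' ') := by
            rintro ⟨rfl, rfl, rfl, rfl⟩; exact h rest rfl
          have hlen := List.length_dropWhile_le (p := (· == ' ')) (l := rest)
          simp only [pvIndentDepthA, List.dropWhile, List.length]
          cases h1 : (a == ' ') <;> cases h2 : (b == ' ') <;>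
            cases h3 : (c == ' ') <;> cases h4 : (d == ' ') <;>
            simp_all <;> omega

theorem pvClassDoc_eq (cs : List Char) : pvClassDocA cs = pvClassDocB cs := by
  have hsplit : PySem.Chars.splitOn "'''#TODO'''\n".toList "\n".toList
      = ["'''#TODO'''".toList, []] := by decide
  simp only [pvClassDocA, pvClassDocB, hsplit, List.foldl, pvIndentDepthA_eq]
  simp [List.append_assoc]

-- ===== VERDICT (by name: the statement is the Claim_ definition above) =====
theorem class_doc_spec : Claim_equal_class_doc := by
  intro line _
  unfold Spec_class_doc class_doc class_doc_alt
  rw [pvClassDoc_eq]
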